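-- pv_equiv track=rewrite | github.com/pdaxt/dataxlr8-rust | tests/e2e_harness.py | _find_create_tool
-- ===== SOURCE A (Python) =====
-- def _find_create_tool(tools, tool_name):
--     """Find the matching create tool for a get/update/delete tool."""
--     # get_note -> create_note, delete_contact -> create_contact
--     entity = tool_name.split("_", 1)[1] if "_" in tool_name else ""
--     create_name = f"create_{entity}"
--     for t in tools:
--         if t["name"] == create_name:
--             return t
--     # Also try: get_manager -> create_manager, update_commission_status -> record_commission
--     for t in tools:
--         if t["name"].startswith("create_") or t["name"].startswith("add_") or t["name"].startswith("record_"):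
--             return t
--     return None
-- ===== SOURCE B (Python) =====
-- def _find_create_tool(tools, tool_name):
--     """Find the matching create tool for a get/update/delete tool (single pass)."""
--     entity = tool_name.split("_", 1)[1] if "_" in tool_name else ""
--     create_name = f"create_{entity}"
--     fallback = None
--     for t in tools:
--         name = t["name"]
--         if name == create_name:
--             return t
--         if fallback is None and (name.startswith("create_") or name.startswith("add_") or name.startswith("record_")):
--             fallback = t
--     return fallback
-- ===== Notes on version B (the rewrite author's own statement) =====
-- stated objective: alternative
-- what changed: Single pass over tools that returns an exact create_<entity> match immediately and remembers the first prefix-named ('create_'/'add_'/'record_') tool as a fallback, replacing A's two separate scans.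
import Mathlib
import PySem

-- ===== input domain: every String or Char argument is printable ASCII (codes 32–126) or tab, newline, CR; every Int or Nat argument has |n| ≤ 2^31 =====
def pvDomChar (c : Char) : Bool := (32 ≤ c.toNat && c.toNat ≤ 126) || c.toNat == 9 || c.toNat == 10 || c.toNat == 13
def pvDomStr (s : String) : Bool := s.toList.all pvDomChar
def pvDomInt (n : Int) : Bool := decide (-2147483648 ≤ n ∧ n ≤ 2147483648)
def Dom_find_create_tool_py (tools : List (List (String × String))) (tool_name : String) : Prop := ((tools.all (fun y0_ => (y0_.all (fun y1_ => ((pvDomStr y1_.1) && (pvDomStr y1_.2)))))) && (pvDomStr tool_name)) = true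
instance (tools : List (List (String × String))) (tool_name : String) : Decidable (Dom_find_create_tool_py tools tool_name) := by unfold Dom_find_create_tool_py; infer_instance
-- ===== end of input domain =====

-- B collapses A's two scans over `tools` into one pass that returns an exact match
-- immediately and remembers the first prefix-named fallback (objective: alternative).


-- shared lexical pieces (written inline in both Pythons)
def pvEntityName (tool_name : String) : String :=
  if PySem.Str.isIn "_" tool_name then
    match PySem.Str.splitMax? tool_name "_" 1 with
    | some parts => (PySem.List.pyGet? parts 1).getD ""  -- index 1 exists whenever "_" ∈ tool_name; exact
    | none => ""  -- unreachable: separator "_" ≠ ""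
  else ""

def pvIsFallbackName (n : String) : Bool :=
  PySem.Str.startswith n "create_" || PySem.Str.startswith n "add_" || PySem.Str.startswith n "record_"

-- ===== PORT A =====
-- first loop: some (some t) = returned t, some none = fell through, none = KeyError (excluded by Pre_)
def pvLoop1 (tools : List (List (String × String))) (cn : String) :
    Option (Option (List (String × String))) :=
  match tools with
  | [] => some none
  | t :: rest =>
    match (PySem.Dict.mk t).get? "name" with
    | none => none
    | some n => if n == cn then some (some t) else pvLoop1 rest cn

-- second loop, same encoding
def pvLoop2 (tools : List (List (String × String))) :
    Option (Option (List (String × String))) :=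
  match tools with
  | [] => some none
  | t :: rest =>
    match (PySem.Dict.mk t).get? "name" with
    | none => none
    | some n => if pvIsFallbackName n then some (some t) else pvLoop2 rest

def find_create_tool_py (tools : List (List (String × String))) (tool_name : String) :
    Option (List (String × String)) :=
  let create_name := "create_" ++ pvEntityName tool_name
  match pvLoop1 tools create_name with
  | some (some t) => some t
  | some none =>
    match pvLoop2 tools with
    | some r => r
    | none => none  -- KeyError in the second loop (excluded by Pre_)
  | none => none    -- KeyError in the first loop (excluded by Pre_)

-- ===== PORT B =====
-- single pass with a fallback accumulator; none from a missing "name" = KeyError (excluded by Pre_)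
def pvLoopB (tools : List (List (String × String))) (cn : String)
    (fallback : Option (List (String × String))) : Option (List (String × String)) :=
  match tools with
  | [] => fallback
  | t :: rest =>
    match (PySem.Dict.mk t).get? "name" with
    | none => none
    | some n =>
      if n == cn then some t
      else pvLoopB rest cn (if fallback.isNone && pvIsFallbackName n then some t else fallback)

def find_create_tool_py_alt (tools : List (List (String × String))) (tool_name : String) :
    Option (List (String × String)) :=
  let create_name := "create_" ++ pvEntityName tool_name
  pvLoopB tools create_name none

-- ===== PRECONDITION & SPEC =====
-- Pre_ excludes exactly the inputs where A raises KeyError: a tool dict without a "name" key.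
def Pre_find_create_tool_py (tools : List (List (String × String))) (_tool_name : String) : Prop :=
  tools.all (fun t => (PySem.Dict.mk t).contains "name") = true
instance (tools : List (List (String × String))) (tool_name : String) : Decidable (Pre_find_create_tool_py tools tool_name) := by unfold Pre_find_create_tool_py; infer_instance

def pvWitness_find_create_tool_py : (List (List (String × String))) × String :=
  ([[("name", "create_note")], [("name", "get_note")]], "get_note")

def Spec_find_create_tool_py (tools : List (List (String × String))) (tool_name : String) (out : Option (List (String × String))) : Prop := out = find_create_tool_py_alt tools tool_name
instance (tools : List (List (String × String))) (tool_name : String) (out : Option (List (String × String))) : Decidable (Spec_find_create_tool_py tools tool_name out) := by unfold Spec_find_create_tool_py; infer_instance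

-- ===== CLAIM (what is proved, stated in full; the proofs are below) =====
def Claim_equal_find_create_tool_py : Prop := ∀ (tools : List (List (String × String))) (tool_name : String), Dom_find_create_tool_py tools tool_name → Pre_find_create_tool_py tools tool_name → Spec_find_create_tool_py tools tool_name (find_create_tool_py tools tool_name)

-- ===== LEMMAS AND PROOFS =====

-- The single pass equals: exact-match scan first; if it falls through, the stored
-- fallback wins over (i.e. equals the result of) the prefix scan restricted to the suffix.
theorem pvLoopB_eq (tools : List (List (String × String))) (cn : String)
    (fb : Option (List (String × String)))
    (h : ∀ t ∈ tools, ((PySem.Dict.mk t).get? "name").isSome) :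
    pvLoopB tools cn fb =
      match pvLoop1 tools cn with
      | some (some t) => some t
      | some none =>
        (match fb with
         | some f => some f
         | none => match pvLoop2 tools with | some r => r | none => none)
      | none => none := by
  induction tools generalizing fb with
  | nil => cases fb <;> simp [pvLoopB, pvLoop1, pvLoop2]
  | cons t rest ih =>
    have ht : ((PySem.Dict.mk t).get? "name").isSome := h t (by simp)
    obtain ⟨n, hn⟩ := Option.isSome_iff_exists.mp ht
    have hrest : ∀ u ∈ rest, ((PySem.Dict.mk u).get? "name").isSome :=
      fun u hu => h u (by simp [hu])
    rw [pvLoopB, pvLoop1, pvLoop2, hn]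
    by_cases hcn : n == cn
    · simp [hcn]
    · simp only [hcn]
      rw [ih _ hrest]
      cases fb with
      | some f => simp [pvIsFallbackName]
      | none =>
        by_cases hp : pvIsFallbackName n <;> simp [hp]

theorem find_create_tool_py_spec : Claim_equal_find_create_tool_py := by
  intro tools tool_name _ hpre
  unfold Spec_find_create_tool_py find_create_tool_py find_create_tool_py_alt
  have h : ∀ t ∈ tools, ((PySem.Dict.mk t).get? "name").isSome := by
    intro t ht
    have := List.all_eq_true.mp hpre t ht
    rwa [PySem.Dict.contains_eq_isSome_get?] at this
  rw [pvLoopB_eq tools _ none h]
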